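-- pv_equiv track=rewrite | github.com/wangzihe2008-afk/study_platform | app/remote_catalog.py | get_filter_options
-- ===== SOURCE A (Python) =====
-- from typing import Any
--
-- def get_filter_options(catalog: list[dict[str, Any]]) -> dict[str, list[str]]:
--     def uniq(key: str):
--         return sorted({item.get(key, '') for item in catalog if item.get(key, '')})
--
--     return {
--         'countries': uniq('country'),
--         'provinces': uniq('province'),
--         'grades': uniq('grade'),
--         'subjects': uniq('subject'),
--     }
-- ===== SOURCE B (Python) =====
-- def get_filter_options(catalog):
--     countries, provinces, grades, subjects = set(), set(), set(), set()
--     for item in catalog: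
--         v = item.get('country', '')
--         if v:
--             countries.add(v)
--         v = item.get('province', '')
--         if v:
--             provinces.add(v)
--         v = item.get('grade', '')
--         if v:
--             grades.add(v)
--         v = item.get('subject', '')
--         if v:
--             subjects.add(v)
--     return {
--         'countries': sorted(countries),
--         'provinces': sorted(provinces),
--         'grades': sorted(grades),
--         'subjects': sorted(subjects),
--     }
-- ===== Notes on version B (the rewrite author's own statement) =====
-- stated objective: alternative
-- what changed: Four separate filtered set-comprehension scans (one per key) are replaced by a single pass over the catalog that populates four sets at once, with sorting done in a separate finalization step.
import Mathlib
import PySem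

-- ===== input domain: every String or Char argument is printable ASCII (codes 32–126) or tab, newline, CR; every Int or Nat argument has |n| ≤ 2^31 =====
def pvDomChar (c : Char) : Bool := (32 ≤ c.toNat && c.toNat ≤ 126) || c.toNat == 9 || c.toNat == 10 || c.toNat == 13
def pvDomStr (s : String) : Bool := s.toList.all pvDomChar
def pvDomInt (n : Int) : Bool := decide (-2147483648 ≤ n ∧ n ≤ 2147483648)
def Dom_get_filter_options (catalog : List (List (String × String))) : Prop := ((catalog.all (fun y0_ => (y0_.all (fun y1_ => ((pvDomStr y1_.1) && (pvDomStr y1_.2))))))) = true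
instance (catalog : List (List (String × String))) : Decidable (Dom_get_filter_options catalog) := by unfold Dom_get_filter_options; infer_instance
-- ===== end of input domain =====

-- B replaces four filtered set-comprehension scans by one pass filling four sets, then sorts each (alternative decomposition, same result).

-- ===== PORT A =====
-- A's inner helper uniq(key): sorted set comprehension over one scan of catalog per key.
def pvUniqA (catalog : List (List (String × String))) (key : String) : List String :=
  PySem.List.sorted
    (PySem.Set.ofList
      ((catalog.filter (fun item => PySem.Dict.getD ⟨item⟩ key "" != "")).map
        (fun item => PySem.Dict.getD ⟨item⟩ key "")))
    (fun x => x) false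

def get_filter_options (catalog : List (List (String × String))) : List (String × List String) :=
  [("countries", pvUniqA catalog "country"),
   ("provinces", pvUniqA catalog "province"),
   ("grades", pvUniqA catalog "grade"),
   ("subjects", pvUniqA catalog "subject")]

-- ===== PORT B =====
-- One pass over catalog maintaining the four sets; sorted at the end.
def pvStepB (st : PySem.Set String × PySem.Set String × PySem.Set String × PySem.Set String)
    (item : List (String × String)) :
    PySem.Set String × PySem.Set String × PySem.Set String × PySem.Set String :=
  match st with
  | (c, p, g, s) =>
    let v1 := PySem.Dict.getD ⟨item⟩ "country" ""
    let c := if v1 != "" then PySem.Set.add c v1 else c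
    let v2 := PySem.Dict.getD ⟨item⟩ "province" ""
    let p := if v2 != "" then PySem.Set.add p v2 else p
    let v3 := PySem.Dict.getD ⟨item⟩ "grade" ""
    let g := if v3 != "" then PySem.Set.add g v3 else g
    let v4 := PySem.Dict.getD ⟨item⟩ "subject" ""
    let s := if v4 != "" then PySem.Set.add s v4 else s
    (c, p, g, s)

def get_filter_options_alt (catalog : List (List (String × String))) : List (String × List String) :=
  match catalog.foldl pvStepB (PySem.Set.empty, PySem.Set.empty, PySem.Set.empty, PySem.Set.empty) with
  | (c, p, g, s) =>
    [("countries", PySem.List.sorted c (fun x => x) false),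
     ("provinces", PySem.List.sorted p (fun x => x) false),
     ("grades", PySem.List.sorted g (fun x => x) false),
     ("subjects", PySem.List.sorted s (fun x => x) false)]

-- ===== PRECONDITION & SPEC =====
def Spec_get_filter_options (catalog : List (List (String × String))) (out : List (String × List String)) : Prop := out = get_filter_options_alt catalog
instance (catalog : List (List (String × String))) (out : List (String × List String)) : Decidable (Spec_get_filter_options catalog out) := by unfold Spec_get_filter_options; infer_instance

-- ===== CLAIM (what is proved, stated in full; the proofs are below) =====
def Claim_equal_get_filter_options : Prop := ∀ (catalog : List (List (String × String))), Dom_get_filter_options catalog → Spec_get_filter_options catalog (get_filter_options catalog)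

-- ===== LEMMAS AND PROOFS =====

-- one component of B's fold, with a general accumulator
def pvFold1 (key : String) (xs : List (List (String × String))) (acc : PySem.Set String) : PySem.Set String :=
  xs.foldl (fun s item =>
    if PySem.Dict.getD ⟨item⟩ key "" != "" then PySem.Set.add s (PySem.Dict.getD ⟨item⟩ key "") else s) acc

lemma pvFold1_eq_ofList_fold (key : String) (xs : List (List (String × String)))
    (acc : PySem.Set String) :
    pvFold1 key xs acc
      = ((xs.filter (fun item => PySem.Dict.getD ⟨item⟩ key "" != "")).map
          (fun item => PySem.Dict.getD ⟨item⟩ key "")).foldl PySem.Set.add acc := by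
  induction xs generalizing acc with
  | nil => rfl
  | cons hd tl ih =>
    simp only [pvFold1] at ih ⊢
    rw [List.foldl_cons, List.filter_cons]
    by_cases h : (PySem.Dict.getD ⟨hd⟩ key "" != "") = true
    · rw [if_pos h, if_pos h, List.map_cons, List.foldl_cons]
      exact ih _
    · rw [if_neg h, if_neg h]
      exact ih _

lemma pvFoldB_components (xs : List (List (String × String)))
    (c p g s : PySem.Set String) :
    xs.foldl pvStepB (c, p, g, s)
      = (pvFold1 "country" xs c, pvFold1 "province" xs p, pvFold1 "grade" xs g, pvFold1 "subject" xs s) := by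
  induction xs generalizing c p g s with
  | nil => rfl
  | cons hd tl ih =>
    simp only [List.foldl_cons, pvStepB]
    rw [ih]
    simp only [pvFold1, List.foldl_cons]

lemma pvUniqA_eq (catalog : List (List (String × String))) (key : String) :
    pvUniqA catalog key = PySem.List.sorted (pvFold1 key catalog PySem.Set.empty) (fun x => x) false := by
  rw [pvFold1_eq_ofList_fold]
  rfl

-- ===== VERDICT (by name: the statement is the Claim_ definition above) =====
theorem get_filter_options_spec : Claim_equal_get_filter_options := by
  intro catalog _
  unfold Spec_get_filter_options get_filter_options get_filter_options_alt
  rw [pvFoldB_components]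
  simp [pvUniqA_eq]
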